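-- pv_equiv track=rewrite | github.com/00riddle00/BSc-InformaticsBasics | python/5_chess.py | below_right_fn
-- ===== SOURCE A (Python) =====
-- def below_right_fn(key):
--     letter, number = key[0], int(key[1])
--     if letter == 'H' or number == 1:
--         return letter
--     else:
--         letter = chr(ord(letter)+1)
--         number -= 1
--         return below_right_fn(letter+str(number))
-- ===== SOURCE B (Python) =====
-- def below_right_fn(key):
--     letter, number = key[0], int(key[1])
--     while letter != 'H' and number != 1:
--         letter = chr(ord(letter) + 1)
--         number -= 1
--     return letter
-- ===== Notes on version B (the rewrite author's own statement) =====
-- stated objective: alternative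
-- what changed: Replaces the tail recursion that rebuilds and re-parses a key string on every step with an explicit while loop over the (letter, number) pair.
import Mathlib
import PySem

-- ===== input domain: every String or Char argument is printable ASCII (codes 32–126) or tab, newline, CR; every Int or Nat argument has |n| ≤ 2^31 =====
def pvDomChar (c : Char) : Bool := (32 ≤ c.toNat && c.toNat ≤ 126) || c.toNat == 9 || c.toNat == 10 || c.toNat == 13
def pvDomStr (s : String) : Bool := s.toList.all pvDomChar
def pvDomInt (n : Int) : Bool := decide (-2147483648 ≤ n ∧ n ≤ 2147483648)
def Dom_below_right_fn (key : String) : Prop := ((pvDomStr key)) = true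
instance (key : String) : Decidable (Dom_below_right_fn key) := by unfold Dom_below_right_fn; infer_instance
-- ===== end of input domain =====

-- B replaces A's tail recursion (which rebuilds and re-parses a key string each step)
-- with an explicit while loop over the (letter, number) pair; return value only.

-- ===== PORT A =====
-- Tail recursion ported with fuel; fuel 20 exceeds the maximal recursion depth (≤ 9,
-- since number = int(key[1]) is a single digit) on every input admitted by Pre_.
-- key[i] → toList[i]? (= PySem.Str.pyGet?); int(c) → PySem.Int.ofChars? [c] (none = ValueError);
-- chr(ord(l)+1) → Char.ofNat (l.toNat+1); str(n) → PySem.Int.toChars.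
def belowRightGo : Nat → List Char → String
  | 0, _ => ""                      -- fuel exhausted: unreachable under Pre_
  | f + 1, cs =>
    match cs[0]?, cs[1]? with
    | some letter, some d =>
      match PySem.Int.ofChars? [d] with
      | none => ""                  -- int() raised ValueError: excluded by Pre_
      | some number =>
        if letter = 'H' ∨ number = 1 then String.ofList [letter]
        else belowRightGo f (Char.ofNat (letter.toNat + 1) :: PySem.Int.toChars (number - 1))
    | _, _ => ""                    -- IndexError: excluded by Pre_

def below_right_fn (key : String) : String := belowRightGo 20 key.toList

-- ===== PORT B =====
-- the while loop, ported with fuel; 200 exceeds the loop count on every input under Pre_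
def altLoop : Nat → Char → Int → Char
  | 0, letter, _ => letter
  | f + 1, letter, number =>
    if letter ≠ 'H' ∧ number ≠ 1 then altLoop f (Char.ofNat (letter.toNat + 1)) (number - 1)
    else letter

def below_right_fn_alt (key : String) : String :=
  match key.toList[0]?, key.toList[1]? with
  | some letter, some d =>
    match PySem.Int.ofChars? [d] with
    | some number => String.ofList [altLoop 200 letter number]
    | none => ""
  | _, _ => ""

-- ===== PRECONDITION & SPEC =====
-- Pre_ excludes exactly the inputs on which Python A raises: keys shorter than two
-- characters (IndexError), a second character that is not a decimal digit (ValueError in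
-- int), and the digit zero paired with a first letter other than the edge letter, where
-- the recursion builds a negative number and its first character fails int() (ValueError).
def Pre_below_right_fn (key : String) : Prop :=
  2 ≤ key.toList.length ∧
  key.toList[1]! ∈ ['0','1','2','3','4','5','6','7','8','9'] ∧
  (key.toList[1]! = '0' → key.toList[0]! = 'H')
instance (key : String) : Decidable (Pre_below_right_fn key) := by
  unfold Pre_below_right_fn; infer_instance

def pvWitness_below_right_fn : String := "A3"

def Spec_below_right_fn (key : String) (out : String) : Prop := out = below_right_fn_alt key
instance (key : String) (out : String) : Decidable (Spec_below_right_fn key out) := by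
  unfold Spec_below_right_fn; infer_instance

-- ===== CLAIM (what is proved, stated in full; the proofs are below) =====
def Claim_equal_below_right_fn : Prop :=
  ∀ (key : String), Dom_below_right_fn key → Pre_below_right_fn key →
    Spec_below_right_fn key (below_right_fn key)

-- ===== LEMMAS AND PROOFS =====

-- one matched step: with a digit char d parsing to k (1 ≤ k ≤ 9) in position 1,
-- A's recursion and B's loop agree, given enough fuel on both sides
theorem step_eq (n : Nat) : ∀ (fa fb : Nat) (c d : Char) (k : Int) (rest : List Char),
    k.toNat = n →
    PySem.Int.ofChars? [d] = some k → 1 ≤ k → k ≤ 9 →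
    k.toNat ≤ fa + 1 → k.toNat ≤ fb + 1 →
    belowRightGo (fa + 1) (c :: d :: rest) = String.ofList [altLoop (fb + 1) c k] := by
  induction n using Nat.strong_induction_on with
  | _ n ih =>
    intro fa fb c d k rest hn hd h1 h9 hfa hfb
    simp only [belowRightGo, altLoop, List.getElem?_cons_zero, List.getElem?_cons_succ, hd]
    by_cases hstop : c = 'H' ∨ k = 1
    · rw [if_pos hstop, if_neg (by tauto)]
    · rw [not_or] at hstop
      rw [if_neg (by tauto), if_pos (by tauto)]
      -- k ∈ 2..9 here; enumerate to compute str(k-1) and its re-parse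
      have hk2 : 2 ≤ k := by
        rcases hstop with ⟨_, hne1⟩; omega
      obtain ⟨d', hd'chars, hd'parse⟩ :
          ∃ d', PySem.Int.toChars (k - 1) = [d'] ∧ PySem.Int.ofChars? [d'] = some (k - 1) := by
        interval_cases k <;>
          first
          | exact ⟨'1', by decide, by decide⟩ | exact ⟨'2', by decide, by decide⟩
          | exact ⟨'3', by decide, by decide⟩ | exact ⟨'4', by decide, by decide⟩
          | exact ⟨'5', by decide, by decide⟩ | exact ⟨'6', by decide, by decide⟩
          | exact ⟨'7', by decide, by decide⟩ | exact ⟨'8', by decide, by decide⟩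
      obtain ⟨fa', rfl⟩ : ∃ fa', fa = fa' + 1 := ⟨fa - 1, by omega⟩
      obtain ⟨fb', rfl⟩ : ∃ fb', fb = fb' + 1 := ⟨fb - 1, by omega⟩
      rw [hd'chars]
      exact ih (k - 1).toNat (by omega) fa' fb' _ d' (k - 1) [] rfl hd'parse
        (by omega) (by omega) (by omega) (by omega)

theorem go_stop (f : Nat) (c d : Char) (k : Int) (rest : List Char)
    (hd : PySem.Int.ofChars? [d] = some k) (hstop : c = 'H' ∨ k = 1) :
    belowRightGo (f + 1) (c :: d :: rest) = String.ofList [c] := by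
  simp only [belowRightGo, List.getElem?_cons_zero, List.getElem?_cons_succ, hd, if_pos hstop]

theorem below_right_eq (key : String) (hpre : Pre_below_right_fn key) :
    below_right_fn key = below_right_fn_alt key := by
  unfold Pre_below_right_fn at hpre
  unfold below_right_fn below_right_fn_alt
  cases hcs : key.toList with
  | nil => rw [hcs] at hpre; simp at hpre
  | cons c0 tl =>
    cases tl with
    | nil => rw [hcs] at hpre; simp at hpre
    | cons c1 rest =>
      rw [hcs] at hpre
      simp only [List.getElem!_cons_succ, List.getElem!_cons_zero] at hpre
      obtain ⟨-, hdig, h0⟩ := hpre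
      -- parse the digit c1
      obtain ⟨k, hk, hk0, hk9, hkzero⟩ :
          ∃ k, PySem.Int.ofChars? [c1] = some k ∧ 0 ≤ k ∧ k ≤ 9 ∧ (k = 0 → c1 = '0') := by
        fin_cases hdig <;>
          first
          | exact ⟨0, by decide, by decide, by decide, by decide⟩
          | exact ⟨1, by decide, by decide, by decide, by decide⟩
          | exact ⟨2, by decide, by decide, by decide, by decide⟩
          | exact ⟨3, by decide, by decide, by decide, by decide⟩
          | exact ⟨4, by decide, by decide, by decide, by decide⟩
          | exact ⟨5, by decide, by decide, by decide, by decide⟩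
          | exact ⟨6, by decide, by decide, by decide, by decide⟩
          | exact ⟨7, by decide, by decide, by decide, by decide⟩
          | exact ⟨8, by decide, by decide, by decide, by decide⟩
          | exact ⟨9, by decide, by decide, by decide, by decide⟩
      simp only [List.getElem?_cons_zero, List.getElem?_cons_succ, hk]
      by_cases hz : k = 0
      · -- c1 = '0', hence c0 = 'H': both sides stop immediately
        have hH : c0 = 'H' := h0 (hkzero hz)
        subst hH; subst hz
        rw [go_stop 19 _ _ _ _ hk (Or.inl rfl)]
        decide
      · exact step_eq k.toNat 19 199 c0 c1 k rest rfl hk (by omega) hk9 (by omega) (by omega)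
-- ===== VERDICT (by name: the statement is the Claim_ definition above) =====
theorem below_right_fn_spec : Claim_equal_below_right_fn := by
  intro key _ hpre
  unfold Spec_below_right_fn
  exact below_right_eq key hpre
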